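-- pv_equiv track=rewrite | github.com/redsand/rev | agent.py | _add_del_from_patch_text
-- ===== SOURCE A (Python) =====
-- def _add_del_from_patch_text(patch: str):
--     adds = dels = 0
--     files = []
--     try:
--         for line in patch.splitlines():
--             if line.startswith("+++ ") and not line.startswith("+++ /dev/null"):
--                 fp = line[4:].strip()
--                 if fp.startswith("b/"):
--                     fp = fp[2:]
--                 if fp not in files:
--                     files.append(fp)
--                 continue
--             if not line or line.startswith(("--- ","+++ ","@@","diff --git")):
--                 continue
--             if line.startswith("+"):
--                 adds += 1
--             elif line.startswith("-"):
--                 dels += 1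
--     except Exception:
--         pass
--     return adds, dels, files
-- ===== SOURCE B (Python) =====
-- def _is_file_header(line):
--     return line.startswith("+++ ") and not line.startswith("+++ /dev/null")
--
-- def _file_path(line):
--     fp = line[4:].strip()
--     return fp[2:] if fp.startswith("b/") else fp
--
-- def _is_body(line):
--     return bool(line) and not line.startswith(("--- ", "+++ ", "@@", "diff --git"))
--
-- def _add_del_from_patch_text(patch):
--     if not isinstance(patch, str):
--         return 0, 0, []
--     lines = patch.splitlines()
--     files = list(dict.fromkeys(_file_path(l) for l in lines if _is_file_header(l)))
--     body = [l for l in lines if _is_body(l)]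
--     adds = sum(1 for l in body if l.startswith("+"))
--     dels = sum(1 for l in body if l.startswith("-"))
--     return adds, dels, files
-- ===== Notes on version B (the rewrite author's own statement) =====
-- stated objective: simpler
-- what changed: A's single interleaved loop carrying (adds, dels, files) state is decomposed into independent passes: an ordered dedup (dict.fromkeys) of the mapped file-header paths for the file list, and separate counts of added and deleted lines over the filtered body lines.
import Mathlib
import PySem

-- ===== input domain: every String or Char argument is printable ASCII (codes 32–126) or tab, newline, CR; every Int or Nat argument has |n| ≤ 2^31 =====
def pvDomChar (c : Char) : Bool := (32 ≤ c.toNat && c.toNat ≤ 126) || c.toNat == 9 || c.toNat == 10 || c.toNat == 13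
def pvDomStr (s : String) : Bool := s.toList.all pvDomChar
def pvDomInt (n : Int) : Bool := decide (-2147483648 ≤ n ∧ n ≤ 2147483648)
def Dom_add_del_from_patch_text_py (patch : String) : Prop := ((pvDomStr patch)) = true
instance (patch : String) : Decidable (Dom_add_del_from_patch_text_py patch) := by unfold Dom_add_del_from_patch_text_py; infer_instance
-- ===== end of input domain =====

-- B replaces A's single interleaved loop by independent passes (an ordered dedup of the
-- mapped file-header paths, and counts over the filtered body lines); objective: simpler.
-- A's try/except is dead code on str input (no statement in the loop can raise), so it is not ported.

-- ===== PORT A =====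
-- the body of A's single for-loop, one step on the state (adds, dels, files)
def aStep (st : Int × Int × List String) (line : String) : Int × Int × List String :=
  let (adds, dels, files) := st
  if PySem.Str.startswith line "+++ " && !PySem.Str.startswith line "+++ /dev/null" then
    let fp := PySem.Str.strip (PySem.Str.slice line (some 4) none)
    let fp := if PySem.Str.startswith fp "b/" then PySem.Str.slice fp (some 2) none else fp
    if files.contains fp then (adds, dels, files) else (adds, dels, files ++ [fp])
  else if line == "" || PySem.Str.startswith line "--- " || PySem.Str.startswith line "+++ "
        || PySem.Str.startswith line "@@" || PySem.Str.startswith line "diff --git" then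
    (adds, dels, files)
  else if PySem.Str.startswith line "+" then (adds + 1, dels, files)
  else if PySem.Str.startswith line "-" then (adds, dels + 1, files)
  else (adds, dels, files)

def add_del_from_patch_text_py (patch : String) : Int × Int × List String :=
  (PySem.Str.splitlines patch).foldl aStep (0, 0, [])

-- ===== PORT B =====
def pvIsFileHeader (line : String) : Bool :=
  PySem.Str.startswith line "+++ " && !PySem.Str.startswith line "+++ /dev/null"

def pvFilePath (line : String) : String :=
  let fp := PySem.Str.strip (PySem.Str.slice line (some 4) none)
  if PySem.Str.startswith fp "b/" then PySem.Str.slice fp (some 2) none else fp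

def pvIsBody (line : String) : Bool :=
  !(line == "") && !(PySem.Str.startswith line "--- " || PySem.Str.startswith line "+++ "
      || PySem.Str.startswith line "@@" || PySem.Str.startswith line "diff --git")

def add_del_from_patch_text_py_alt (patch : String) : Int × Int × List String :=
  let lines := PySem.Str.splitlines patch
  let files := PySem.List.dedup ((lines.filter pvIsFileHeader).map pvFilePath)
  let body := lines.filter pvIsBody
  ((body.countP (fun l => PySem.Str.startswith l "+") : Int),
   (body.countP (fun l => PySem.Str.startswith l "-") : Int),
   files)

-- ===== PRECONDITION & SPEC =====
def Spec_add_del_from_patch_text_py (patch : String) (out : Int × Int × List String) : Prop := out = add_del_from_patch_text_py_alt patch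
instance (patch : String) (out : Int × Int × List String) : Decidable (Spec_add_del_from_patch_text_py patch out) := by unfold Spec_add_del_from_patch_text_py; infer_instance

-- ===== CLAIM =====
def Claim_equal_add_del_from_patch_text_py : Prop := ∀ (patch : String), Dom_add_del_from_patch_text_py patch → Spec_add_del_from_patch_text_py patch (add_del_from_patch_text_py patch)

-- ===== LEMMAS AND PROOFS =====
lemma pv_plus_not_minus (cs : List Char) (h : PySem.Chars.startswith cs ['+'] = true) :
    PySem.Chars.startswith cs ['-'] = false := by
  cases cs with
  | nil => simp [PySem.Chars.startswith] at h
  | cons c t =>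
    simp [PySem.Chars.startswith, List.isPrefixOf] at h ⊢
    intro hc
    rw [← hc] at h
    exact absurd h (by decide)

lemma pv_header_not_body (l : String) (h : pvIsFileHeader l = true) : pvIsBody l = false := by
  unfold pvIsFileHeader at h
  rw [Bool.and_eq_true] at h
  have h1 := h.1
  simp at h1
  simp [pvIsBody, h1]

lemma pv_isPrefixOf_false_iff (a b : List Char) : a.isPrefixOf b = false ↔ ¬ a <+: b := by
  rw [← List.isPrefixOf_iff_prefix]
  cases List.isPrefixOf a b <;> simp

lemma aStep_eq (a d : Int) (fs : List String) (l : String) :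
    aStep (a, d, fs) l =
      if pvIsFileHeader l = true then (a, d, PySem.Set.add fs (pvFilePath l))
      else if pvIsBody l = true then
        (if PySem.Str.startswith l "+" = true then (a + 1, d, fs)
         else if PySem.Str.startswith l "-" = true then (a, d + 1, fs) else (a, d, fs))
      else (a, d, fs) := by
  by_cases h0 : l = "" <;>
  cases h1 : PySem.Chars.startswith l.toList ['+', '+', '+', ' '] <;>
  cases h2 : PySem.Chars.startswith l.toList
      ['+', '+', '+', ' ', '/', 'd', 'e', 'v', '/', 'n', 'u', 'l', 'l'] <;>
  cases h3 : PySem.Chars.startswith l.toList ['-', '-', '-', ' '] <;>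
  cases h4 : PySem.Chars.startswith l.toList ['@', '@'] <;>
  cases h5 : PySem.Chars.startswith l.toList ['d', 'i', 'f', 'f', ' ', '-', '-', 'g', 'i', 't'] <;>
  simp_all [aStep, pvIsFileHeader, pvIsBody, pvFilePath, PySem.Set.add, PySem.Set.contains,
    PySem.Chars.startswith] <;>
  (try (split_ifs <;> simp_all [pv_isPrefixOf_false_iff]))

lemma aStep_fold_eq (ls : List String) (a d : Int) (fs : List String) :
    ls.foldl aStep (a, d, fs) =
      (a + ((ls.filter pvIsBody).countP (fun l => PySem.Str.startswith l "+") : Int),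
       d + ((ls.filter pvIsBody).countP (fun l => PySem.Str.startswith l "-") : Int),
       PySem.Set.update fs ((ls.filter pvIsFileHeader).map pvFilePath)) := by
  induction ls generalizing a d fs with
  | nil => simp [PySem.Set.update]
  | cons l ls ih =>
    rw [List.foldl_cons, aStep_eq]
    by_cases hf : pvIsFileHeader l = true
    · have hb := pv_header_not_body l hf
      simp only [hf, if_true, List.filter_cons, hb, Bool.false_eq_true, if_false, List.map_cons, ih]
      rfl
    · have hf' : pvIsFileHeader l = false := by simpa using hf
      by_cases hb : pvIsBody l = true
      · simp only [hf', Bool.false_eq_true, if_false, hb, if_true, List.filter_cons,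
          List.countP_cons]
        by_cases hp : PySem.Str.startswith l "+" = true
        · have hm : PySem.Str.startswith l "-" = false := by
            have := hp; simp at this
            have := pv_plus_not_minus l.toList this
            simpa using this
          simp only [hp, if_true, ih, hm, Bool.false_eq_true, if_false, Prod.mk.injEq]
          refine ⟨by push_cast; ring, by push_cast; ring, trivial⟩
        · have hp' : PySem.Str.startswith l "+" = false := by simpa using hp
          by_cases hm : PySem.Str.startswith l "-" = true
          · simp only [hp', Bool.false_eq_true, if_false, hm, if_true, ih, Prod.mk.injEq]
            refine ⟨by push_cast; ring, by push_cast; ring, trivial⟩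
          · have hm' : PySem.Str.startswith l "-" = false := by simpa using hm
            simp only [hp', hm', Bool.false_eq_true, if_false, ih]
            simp
      · have hb' : pvIsBody l = false := by simpa using hb
        simp only [hf', hb', Bool.false_eq_true, if_false, List.filter_cons, ih]

-- ===== VERDICT =====
theorem add_del_from_patch_text_py_spec : Claim_equal_add_del_from_patch_text_py := by
  intro patch _
  unfold Spec_add_del_from_patch_text_py add_del_from_patch_text_py add_del_from_patch_text_py_alt
  rw [aStep_fold_eq]
  simp [PySem.List.dedup_eq_ofList, PySem.Set.ofList, PySem.Set.update]
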